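-- pv_equiv track=rewrite | github.com/p-anastas/PARALiA-GEMMex | nvidia_topo_parse.py | translate_binary_to_unit_list
-- ===== SOURCE A (Python) =====
-- def translate_binary_to_unit_list(case_id, chl_workers):
--     active_unit_id_list = []
--     active_unit_num = 0
--
--     for mask_offset in range(chl_workers):
--         mask = 1 << mask_offset
--         if case_id & mask:
--             active_unit_id_list.append(mask_offset)
--             active_unit_num += 1
--
--     return active_unit_num, active_unit_id_list
-- ===== SOURCE B (Python) =====
-- def translate_binary_to_unit_list(case_id, chl_workers):
--     # Iterate only over the SET bits of the masked value: each step clears the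
--     # lowest set bit (v & (v-1)) and records its position via bit_length, so the
--     # loop runs popcount times instead of chl_workers times.
--     ids = []
--     if chl_workers > 0:
--         v = case_id & ((1 << chl_workers) - 1)
--         while v:
--             v2 = v & (v - 1)                    # v with its lowest set bit cleared
--             ids.append((v - v2).bit_length() - 1)  # position of that lowest set bit
--             v = v2
--     return len(ids), ids
-- ===== Notes on version B (the rewrite author's own statement) =====
-- stated objective: faster
-- what changed: Instead of scanning every position below chl_workers with a fresh mask, B masks case_id once and then walks only its set bits, clearing the lowest set bit (v & (v-1)) each step and reading its position off bit_length, so the loop runs popcount times.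
import Mathlib
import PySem

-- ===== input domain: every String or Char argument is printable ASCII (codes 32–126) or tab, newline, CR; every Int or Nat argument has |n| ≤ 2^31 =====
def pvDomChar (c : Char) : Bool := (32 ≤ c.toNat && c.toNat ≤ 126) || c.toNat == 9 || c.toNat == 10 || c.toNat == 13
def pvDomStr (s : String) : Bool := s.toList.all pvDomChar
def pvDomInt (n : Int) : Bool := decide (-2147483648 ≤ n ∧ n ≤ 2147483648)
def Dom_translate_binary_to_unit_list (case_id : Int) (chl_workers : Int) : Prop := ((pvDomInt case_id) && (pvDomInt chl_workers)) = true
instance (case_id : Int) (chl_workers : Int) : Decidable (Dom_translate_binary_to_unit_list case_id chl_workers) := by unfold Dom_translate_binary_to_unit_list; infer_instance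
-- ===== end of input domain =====

-- B masks case_id once and walks only its set bits (clearing the lowest set bit each
-- step) instead of testing every position below chl_workers with a fresh mask.

-- ===== PORT A =====
-- `case_id & mask` / `1 << mask_offset` are ported with Int.land / `<<<` on Int,
-- which have Python's two's-complement semantics; `if case_id & mask:` is `≠ 0`.
def translate_binary_to_unit_list (case_id : Int) (chl_workers : Int) : Int × List Int :=
  (PySem.List.pyRange 0 chl_workers 1).foldl
    (fun (st : Int × List Int) mask_offset =>
      let mask : Int := (1 : Int) <<< mask_offset
      if Int.land case_id mask ≠ 0 then (st.1 + 1, st.2 ++ [mask_offset]) else st)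
    (0, [])

-- ===== PORT B =====
-- Source B's `while v:` loop; its v is the nonnegative masked value, so iterating on its
-- Nat image is exact: `v & (v - 1)` is w &&& (w - 1), and `(v - v2).bit_length() - 1`
-- for the positive difference v - v2 is Nat.log2 (w - w2).
def pvLowLoop (w : Nat) (ids : List Int) : List Int :=
  if _h : w = 0 then ids
  else
    let w2 := w &&& (w - 1)
    pvLowLoop w2 (ids ++ [((Nat.log2 (w - w2) : Int))])
  termination_by w
  decreasing_by
    have hle : w &&& (w - 1) ≤ w - 1 := Nat.and_le_right
    omega

-- `1 << chl_workers` is ported as `2 ^ chl_workers.toNat`, exact under the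
-- `0 < chl_workers` guard.
def translate_binary_to_unit_list_alt (case_id : Int) (chl_workers : Int) : Int × List Int :=
  let ids : List Int :=
    if 0 < chl_workers then
      pvLowLoop (Int.land case_id ((2 : Int) ^ chl_workers.toNat - 1)).toNat []
    else []
  ((ids.length : Int), ids)

-- ===== PRECONDITION & SPEC =====
def Spec_translate_binary_to_unit_list (case_id : Int) (chl_workers : Int) (out : Int × List Int) : Prop := out = translate_binary_to_unit_list_alt case_id chl_workers
instance (case_id : Int) (chl_workers : Int) (out : Int × List Int) : Decidable (Spec_translate_binary_to_unit_list case_id chl_workers out) := by unfold Spec_translate_binary_to_unit_list; infer_instance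

-- ===== CLAIM (what is proved, stated in full; the proofs are below) =====
def Claim_equal_translate_binary_to_unit_list : Prop := ∀ (case_id : Int) (chl_workers : Int), Dom_translate_binary_to_unit_list case_id chl_workers → Spec_translate_binary_to_unit_list case_id chl_workers (translate_binary_to_unit_list case_id chl_workers)

-- ===== LEMMAS AND PROOFS =====

-- clearing the lowest set bit, parity identities
theorem and_pred_odd (a : Nat) : (2 * a + 1) &&& (2 * a) = 2 * a := by
  refine Nat.eq_of_testBit_eq fun i => ?_
  rw [Nat.testBit_and]
  cases i with
  | zero => simp [Nat.testBit_zero]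
  | succ i =>
      simp [Nat.testBit_succ,
        Nat.mul_add_div (by norm_num : 0 < 2), Nat.mul_div_cancel_left a (by norm_num : 0 < 2)]

theorem and_pred_even (a : Nat) (ha : a ≠ 0) : (2 * a) &&& (2 * a - 1) = 2 * (a &&& (a - 1)) := by
  have h : 2 * a - 1 = 2 * (a - 1) + 1 := by omega
  refine Nat.eq_of_testBit_eq fun i => ?_
  rw [Nat.testBit_and]
  cases i with
  | zero => simp [Nat.testBit_zero, h, Nat.mul_mod_right]
  | succ i =>
      simp [Nat.testBit_succ, Nat.testBit_and, h,
        Nat.mul_add_div (by norm_num : 0 < 2),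
        Nat.mul_div_cancel_left a (by norm_num : 0 < 2)]

theorem log2_two_mul (n : Nat) (hn : n ≠ 0) : Nat.log2 (2 * n) = Nat.log2 n + 1 := by
  rw [Nat.log2_eq_log_two, Nat.log2_eq_log_two, Nat.mul_comm,
    Nat.log_mul_base Nat.one_lt_two hn]

-- the heart: B's step peels off exactly the first bit index
theorem bitIndices_step (w : Nat) (hw : w ≠ 0) :
    Nat.bitIndices w
      = (Nat.log2 (w - (w &&& (w - 1))) : Nat) :: Nat.bitIndices (w &&& (w - 1)) := by
  induction w using Nat.strong_induction_on with
  | _ w ih =>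
    rcases Nat.mod_two_eq_zero_or_one w with hm | hm
    · -- even: w = 2a, a ≠ 0
      obtain ⟨a, rfl⟩ : ∃ a, w = 2 * a := ⟨w / 2, by omega⟩
      have ha : a ≠ 0 := by omega
      have hand := and_pred_even a ha
      have hle : a &&& (a - 1) ≤ a - 1 := Nat.and_le_right
      have hdiff : 2 * a - 2 * (a &&& (a - 1)) = 2 * (a - (a &&& (a - 1))) := by omega
      rw [hand, hdiff, log2_two_mul _ (by omega)]
      have hIH := ih a (by omega) ha
      calc Nat.bitIndices (2 * a)
          = (Nat.bitIndices a).map (· + 1) := Nat.bitIndices_two_mul a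
        _ = (Nat.log2 (a - (a &&& (a - 1))) + 1)
              :: (Nat.bitIndices (a &&& (a - 1))).map (· + 1) := by rw [hIH]; rfl
        _ = (Nat.log2 (a - (a &&& (a - 1))) + 1) :: Nat.bitIndices (2 * (a &&& (a - 1))) := by
              rw [Nat.bitIndices_two_mul]
    · -- odd: w = 2a + 1
      obtain ⟨a, rfl⟩ : ∃ a, w = 2 * a + 1 := ⟨w / 2, by omega⟩
      have hand : (2 * a + 1) &&& (2 * a + 1 - 1) = 2 * a := by
        simpa using and_pred_odd a
      rw [hand]
      have hdiff : 2 * a + 1 - 2 * a = 1 := by omega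
      rw [hdiff]
      have hlog : Nat.log2 1 = 0 := by decide
      rw [hlog, Nat.bitIndices_two_mul_add_one, Nat.bitIndices_two_mul]

-- B's loop emits the bit indices of w
theorem pvLowLoop_eq (w : Nat) : ∀ (ids : List Int),
    pvLowLoop w ids = ids ++ (Nat.bitIndices w).map (fun (i : Nat) => (i : Int)) := by
  induction w using Nat.strong_induction_on with
  | _ w ih =>
    intro ids
    rw [pvLowLoop]
    by_cases h : w = 0
    · simp [h]
    · have hle : w &&& (w - 1) ≤ w - 1 := Nat.and_le_right
      rw [dif_neg h, ih _ (by omega), bitIndices_step w h]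
      simp

theorem mem_bitIndices_iff (w : Nat) : ∀ i, i ∈ Nat.bitIndices w ↔ w.testBit i = true := by
  induction w using Nat.strong_induction_on with
  | _ w ih =>
    intro i
    by_cases h : w = 0
    · simp [h]
    · have hlt : w / 2 < w := Nat.div_lt_self (Nat.pos_of_ne_zero h) one_lt_two
      rcases Nat.mod_two_eq_zero_or_one w with hm | hm
      · have hbi : Nat.bitIndices w = (Nat.bitIndices (w / 2)).map (· + 1) := by
          conv_lhs => rw [show w = 2 * (w / 2) by omega]
          exact Nat.bitIndices_two_mul _
        cases i with
        | zero => simp [hbi, Nat.testBit_zero, hm]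
        | succ i => simp [hbi, Nat.testBit_succ, ih _ hlt]
      · have hbi : Nat.bitIndices w = 0 :: (Nat.bitIndices (w / 2)).map (· + 1) := by
          conv_lhs => rw [show w = 2 * (w / 2) + 1 by omega]
          exact Nat.bitIndices_two_mul_add_one _
        cases i with
        | zero => simp [hbi, Nat.testBit_zero, hm]
        | succ i => simp [hbi, Nat.testBit_succ, ih _ hlt]

-- Python's `case_id & (1 << i)` is nonzero exactly when bit i of case_id is set.
theorem land_pow_ne_zero_iff (c : Int) (i : Nat) :
    (Int.land c ((1 : Int) <<< (i : Int)) ≠ 0) ↔ c.testBit i = true := by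
  rw [Int.one_shiftLeft]
  cases c with
  | ofNat a =>
      have hland : Int.land (Int.ofNat a) ((2 ^ i : Nat) : Int) = Int.ofNat (a &&& 2 ^ i) := rfl
      rw [hland, Nat.and_two_pow]
      show Int.ofNat _ ≠ 0 ↔ Nat.testBit a i = true
      cases hb : a.testBit i <;> simp [Int.ofNat_eq_natCast]
  | negSucc a =>
      have hland : Int.land (Int.negSucc a) ((2 ^ i : Nat) : Int) = Int.ofNat (Nat.ldiff (2 ^ i) a) := rfl
      have htb : Int.testBit (Int.negSucc a) i = !a.testBit i := rfl
      rw [hland, htb]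
      cases hb : a.testBit i
      · have hne : Nat.ldiff (2 ^ i) a ≠ 0 := by
          intro h0
          have := congrArg (fun x => x.testBit i) h0
          simp [Nat.testBit_ldiff, hb] at this
        simp [Int.ofNat_eq_natCast, hne]
      · have heq : Nat.ldiff (2 ^ i) a = 0 := by
          refine Nat.eq_of_testBit_eq fun k => ?_
          rw [Nat.testBit_ldiff, Nat.testBit_two_pow]
          by_cases hk : i = k
          · subst hk; simp [hb]
          · simp [hk]
        simp [heq, Int.ofNat_eq_natCast]

theorem mask_eq_natCast (N : Nat) : (2 : Int) ^ N - 1 = ((2 ^ N - 1 : Nat) : Int) := by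
  have h1 : (1 : Nat) ≤ 2 ^ N := Nat.one_le_two_pow
  push_cast [h1]
  ring

theorem masked_nonneg (c : Int) (N : Nat) :
    0 ≤ Int.land c ((2 : Int) ^ N - 1) := by
  rw [mask_eq_natCast]
  cases c with
  | ofNat a => exact Int.natCast_nonneg _
  | negSucc a => exact Int.natCast_nonneg _

theorem testBit_masked (c : Int) (N i : Nat) :
    (Int.land c ((2 : Int) ^ N - 1)).toNat.testBit i
      = (c.testBit i && decide (i < N)) := by
  have hnn := masked_nonneg c N
  have hcast : ((Int.land c ((2 : Int) ^ N - 1)).toNat : Int)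
      = Int.land c ((2 : Int) ^ N - 1) := Int.toNat_of_nonneg hnn
  have hInt : Nat.testBit (Int.land c ((2 : Int) ^ N - 1)).toNat i
      = Int.testBit (Int.land c ((2 : Int) ^ N - 1)) i := by
    rw [← hcast]; rfl
  rw [hInt, mask_eq_natCast, Int.testBit_land]
  have h2 : Int.testBit ((2 ^ N - 1 : Nat) : Int) i = Nat.testBit (2 ^ N - 1) i := rfl
  rw [h2, Nat.testBit_two_pow_sub_one]

-- A's loop over any index list is a filter with a running count.
theorem foldA_eq (c : Int) (xs : List Int) : ∀ (k : Int) (l : List Int),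
    xs.foldl
      (fun (st : Int × List Int) mask_offset =>
        let mask : Int := (1 : Int) <<< mask_offset
        if Int.land c mask ≠ 0 then (st.1 + 1, st.2 ++ [mask_offset]) else st)
      (k, l)
    = (k + ((xs.filter fun x => decide (Int.land c ((1 : Int) <<< x) ≠ 0)).length : Int),
       l ++ xs.filter fun x => decide (Int.land c ((1 : Int) <<< x) ≠ 0)) := by
  induction xs with
  | nil => intro k l; simp
  | cons x xs ih =>
      intro k l
      by_cases h : Int.land c ((1 : Int) <<< x) ≠ 0
      · simp only [List.foldl_cons, List.filter_cons]
        rw [if_pos h, if_pos (decide_eq_true h), ih]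
        refine Prod.ext ?_ ?_
        · simp only [List.length_cons]
          push_cast
          ring
        · simp
      · simp only [List.foldl_cons, List.filter_cons]
        rw [if_neg h, if_neg (by simpa using h), ih]

-- the Nat-level heart shared with A: the indices below N with a set bit, in order,
-- are the bit indices of the masked value.
theorem filter_range_eq_bitIndices (c : Int) (N : Nat) :
    ((List.range N).filter fun (i : Nat) => decide (Int.land c ((1 : Int) <<< (i : Int)) ≠ 0))
      = Nat.bitIndices (Int.land c ((2 : Int) ^ N - 1)).toNat := by
  refine List.Perm.eq_of_pairwise (le := (· < ·)) (fun a b _ _ hab hba => by omega)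
    (List.Pairwise.filter _ List.pairwise_lt_range)
    (List.sortedLT_iff_pairwise.mp Nat.bitIndices_sorted) ?_
  refine (List.perm_ext_iff_of_nodup (List.Nodup.filter _ List.nodup_range) Nat.bitIndices_nodup).mpr
    fun i => ?_
  rw [List.mem_filter, List.mem_range, mem_bitIndices_iff, testBit_masked,
    decide_eq_true_eq, land_pow_ne_zero_iff]
  constructor
  · rintro ⟨h1, h2⟩; simp [h1, h2]
  · intro h; simp at h; exact ⟨h.2, h.1⟩

-- ===== VERDICT (by name: the statement is the Claim_ definition above) =====
theorem translate_binary_to_unit_list_spec : Claim_equal_translate_binary_to_unit_list := by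
  intro c n _
  unfold Spec_translate_binary_to_unit_list
  unfold translate_binary_to_unit_list translate_binary_to_unit_list_alt
  by_cases hn : 0 < n
  · have hNn : ((n.toNat : Nat) : Int) = n := Int.toNat_of_nonneg hn.le
    rw [if_pos hn, pvLowLoop_eq, ← hNn, PySem.List.pyRange_zero_natCast, foldA_eq,
      List.filter_map, List.nil_append]
    have hlist :
        ((List.range n.toNat).filter
            ((fun x => decide (Int.land c ((1 : Int) <<< x) ≠ 0)) ∘ fun (k : Nat) => (k : Int))).map
            (fun (k : Nat) => (k : Int))
        = (Nat.bitIndices (Int.land c ((2 : Int) ^ n.toNat - 1)).toNat).map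
            (fun (i : Nat) => (i : Int)) := by
      simp only [Function.comp_def]
      rw [filter_range_eq_bitIndices c n.toNat]
    rw [hlist]
    simp only [List.nil_append, zero_add, Int.toNat_natCast]
  · rw [if_neg hn, PySem.List.pyRange_one_eq_nil (by omega)]
    simp
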